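-- pv_equiv track=rewrite | github.com/miczek2309/logia | duza_liczba.py | duza_liczba
-- ===== SOURCE A (Python) =====
-- def duza_liczba(lista1):
--     lista = []
--     for x in lista1:
--         if x not in lista:
--             lista.append(x)
--     lista = sorted(lista, reverse=True)
--     s = 0
--     for i in lista:
--         s = s * 10 + i
--     return s
-- ===== SOURCE B (Python) =====
-- def duza_liczba(lista1):
--     s = 0
--     prev = None
--     for i in sorted(lista1, reverse=True):
--         if prev is None or i != prev:
--             s = s * 10 + i
--         prev = i
--     return s
-- ===== Notes on version B (the rewrite author's own statement) =====
-- stated objective: faster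
-- what changed: Replaces A's quadratic membership-test dedup plus separate Horner fold with sort-first and a single fused pass that skips adjacent duplicates via a 'prev' sentinel.
import Mathlib
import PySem

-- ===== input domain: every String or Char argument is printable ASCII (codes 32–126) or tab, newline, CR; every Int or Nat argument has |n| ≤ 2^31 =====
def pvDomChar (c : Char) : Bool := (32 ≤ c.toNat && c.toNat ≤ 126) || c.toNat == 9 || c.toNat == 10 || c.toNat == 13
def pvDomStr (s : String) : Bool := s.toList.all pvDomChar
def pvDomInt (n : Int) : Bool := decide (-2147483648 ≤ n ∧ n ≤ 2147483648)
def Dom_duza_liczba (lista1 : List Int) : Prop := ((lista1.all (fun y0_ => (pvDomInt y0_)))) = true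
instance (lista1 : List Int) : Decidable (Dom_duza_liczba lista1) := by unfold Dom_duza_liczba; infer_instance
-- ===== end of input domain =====

-- B sorts first and fuses dedup into the Horner fold by skipping adjacent duplicates,
-- replacing A's quadratic membership-test dedup: faster.


-- ===== PORT A =====
def duza_liczba (lista1 : List Int) : Int :=
  (PySem.List.sorted
    (lista1.foldl (fun acc x => if x ∉ acc then acc ++ [x] else acc) [])
    (fun x => x) true).foldl (fun s i => s * 10 + i) 0

-- ===== PORT B =====
def duza_liczba_alt (lista1 : List Int) : Int :=
  ((PySem.List.sorted lista1 (fun x => x) true).foldl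
    (fun (st : Int × Option Int) i =>
      (if st.2 = some i then st.1 else st.1 * 10 + i, some i))
    (0, none)).1

-- ===== PRECONDITION & SPEC =====
def Spec_duza_liczba (lista1 : List Int) (out : Int) : Prop := out = duza_liczba_alt lista1
instance (lista1 : List Int) (out : Int) : Decidable (Spec_duza_liczba lista1 out) := by unfold Spec_duza_liczba; infer_instance

-- ===== CLAIM (what is proved, stated in full; the proofs are below) =====
def Claim_equal_duza_liczba : Prop := ∀ (lista1 : List Int), Dom_duza_liczba lista1 → Spec_duza_liczba lista1 (duza_liczba lista1)

-- ===== LEMMAS AND PROOFS =====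

-- adjacent-duplicate removal after a leading element p
def ddGo (p : Int) : List Int → List Int
  | [] => []
  | b :: t => if b = p then ddGo p t else b :: ddGo b t

-- A's membership-test dedup loop builds exactly the Python set-in-insertion-order
theorem dedup_loop_eq_ofList (lista1 : List Int) :
    lista1.foldl (fun acc x => if x ∉ acc then acc ++ [x] else acc) [] =
      PySem.Set.ofList lista1 := by
  rw [PySem.Set.ofList_eq_foldl]
  apply PySem.List.foldl_congr_mem
  intro acc x _
  simp [PySem.Set.add, PySem.Set.contains]

theorem ddGo_spec (l : List Int) : ∀ p : Int, l.Pairwise (· ≥ ·) → (∀ x ∈ l, x ≤ p) →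
    (∀ x, x ∈ ddGo p l ↔ x ∈ l ∧ x ≠ p) ∧ (p :: ddGo p l).Pairwise (· > ·) := by
  induction l with
  | nil => intro p _ _; simp [ddGo]
  | cons b t ih =>
    intro p hpw hle
    rw [List.pairwise_cons] at hpw
    obtain ⟨hbt, hpt⟩ := hpw
    by_cases hbp : b = p
    · subst hbp
      have h := ih b hpt (fun x hx => hbt x hx)
      have hdd : ddGo b (b :: t) = ddGo b t := by simp [ddGo]
      rw [hdd]
      constructor
      · intro x
        rw [h.1 x, List.mem_cons]
        constructor
        · rintro ⟨hx, hne⟩; exact ⟨Or.inr hx, hne⟩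
        · rintro ⟨hx, hne⟩
          rcases hx with h1 | h1
          · exact absurd h1 hne
          · exact ⟨h1, hne⟩
      · exact h.2
    · have hblt : b < p := lt_of_le_of_ne (hle b (by simp)) hbp
      have h := ih b hpt (fun x hx => hbt x hx)
      have hdd : ddGo p (b :: t) = b :: ddGo b t := by simp [ddGo, hbp]
      rw [hdd]
      constructor
      · intro x
        constructor
        · intro hx
          rcases List.mem_cons.mp hx with h1 | h1
          · subst h1; exact ⟨by simp, hbp⟩
          · have := (h.1 x).mp h1
            refine ⟨by simp [this.1], ?_⟩
            have : x ≤ b := hbt x this.1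
            omega
        · rintro ⟨hx, hne⟩
          rcases List.mem_cons.mp hx with h1 | h1
          · simp [h1]
          · have hxb : x ≤ b := hbt x h1
            by_cases hxb' : x = b
            · simp [hxb']
            · exact List.mem_cons_of_mem _ ((h.1 x).mpr ⟨h1, hxb'⟩)
      · rw [List.pairwise_cons]
        refine ⟨?_, h.2⟩
        intro y hy
        rcases List.mem_cons.mp hy with h1 | h1
        · omega
        · have := (h.1 y).mp h1
          have : y ≤ b := hbt y this.1
          omega

-- B's fused fold over a list with prev = some p computes the Horner fold over ddGo p
theorem fold_prev_eq (l : List Int) : ∀ (s p : Int),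
    (l.foldl (fun (st : Int × Option Int) i =>
        (if st.2 = some i then st.1 else st.1 * 10 + i, some i)) (s, some p)).1 =
      (ddGo p l).foldl (fun s i => s * 10 + i) s := by
  induction l with
  | nil => intro s p; simp [ddGo]
  | cons b t ih =>
    intro s p
    by_cases h : b = p
    · subst h; simp [ddGo, ih]
    · simp only [List.foldl_cons, ddGo, if_neg h]
      have : (some p = some b) = False := by simp; omega
      simp only [this, if_false, ih]

theorem duza_liczba_eq (lista1 : List Int) : duza_liczba lista1 = duza_liczba_alt lista1 := by
  show (PySem.List.sorted
      (lista1.foldl (fun acc x => if x ∉ acc then acc ++ [x] else acc) [])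
      (fun x => x) true).foldl (fun s i => s * 10 + i) 0 =
    ((PySem.List.sorted lista1 (fun x => x) true).foldl
      (fun (st : Int × Option Int) i =>
        (if st.2 = some i then st.1 else st.1 * 10 + i, some i)) (0, none)).1
  rw [dedup_loop_eq_ofList]
  cases hL : PySem.List.sorted lista1 (fun x => x) true with
  | nil =>
    have h1 : lista1 = [] := (PySem.List.sorted_eq_nil_iff _ _ _).mp hL
    subst h1
    simp [PySem.Set.ofList, PySem.List.sorted]
  | cons a t =>
    have hpw : (a :: t).Pairwise (· ≥ ·) := by
      have := PySem.List.sorted_pairwise_rev lista1 (fun x => x) (κ := Int)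
      rw [hL] at this
      exact this
    rw [List.pairwise_cons] at hpw
    have hspec := ddGo_spec t a hpw.2 hpw.1
    have hsorted : PySem.List.sorted (PySem.Set.ofList lista1) (fun x => x) true = a :: ddGo a t := by
      apply PySem.List.sorted_rev_eq_of_perm_of_pairwise_gt
      · apply (List.perm_ext_iff_of_nodup ?_ ?_).mpr
        · intro x
          rw [List.mem_cons, (hspec.1 x), PySem.Set.mem_ofList]
          have hmem : x ∈ lista1 ↔ x ∈ a :: t := by
            rw [← hL, PySem.List.mem_sorted]
          rw [hmem, List.mem_cons]
          by_cases hxa : x = a <;> simp [hxa]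
        · exact (hspec.2.imp (fun h => ne_of_gt h) : (a :: ddGo a t).Pairwise Ne)
        · exact PySem.Set.nodup_ofList lista1
      · exact hspec.2
    rw [hsorted]
    simp only [List.foldl_cons, reduceCtorEq, if_false]
    rw [show ((0:Int) * 10 + a, some a) = ((a:Int), some a) by norm_num]
    rw [fold_prev_eq]
    norm_num

-- ===== VERDICT (by name: the statement is the Claim_ definition above) =====
theorem duza_liczba_spec : Claim_equal_duza_liczba := by
  intro lista1 _
  unfold Spec_duza_liczba
  exact duza_liczba_eq lista1
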